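-- pv_equiv track=rewrite | github.com/pypi-data/pypi-mirror-403 | packages/brkraw/brkraw-0.5.6-py3-none-any.whl/brkraw/core/jcamp.py | split_tokens_angle_aware
-- ===== SOURCE A (Python) =====
-- from typing import IO, Iterable, Union, Optional, List, Tuple, Any
--
-- def split_tokens_angle_aware(s: str) -> List[str]:
--     """Tokenize by whitespace while keeping `<...>` blocks intact.
--
--     Angle-bracketed sections such as `<PVM_SliceGeoObj>` are treated as
--     indivisible tokens, even when they contain spaces.
--
--     Args:
--         s: Raw string possibly containing angle-bracketed sections.
--
--     Returns:
--         List[str]: Token list with angle-bracketed content preserved.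
--     """
--     tokens: List[str] = []
--     buf: List[str] = []
--     angle_depth = 0
--     escape = False
--
--     for ch in s:
--         if escape:
--             buf.append(ch)
--             escape = False
--             continue
--         if ch == '\\':
--             buf.append(ch)
--             escape = True
--             continue
--
--         if ch == '<':
--             if buf and angle_depth == 0:
--                 tokens.append(''.join(buf))
--                 buf = []
--             angle_depth += 1
--             buf.append(ch)
--         elif ch == '>':
--             buf.append(ch)
--             if angle_depth > 0:
--                 angle_depth -= 1
--                 if angle_depth == 0:
--                     tokens.append(''.join(buf))
--                     buf = []
--         elif ch.isspace() and angle_depth == 0: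
--             if buf:
--                 tokens.append(''.join(buf))
--                 buf = []
--         else:
--             buf.append(ch)
--
--     if buf:
--         tokens.append(''.join(buf))
--
--     return [t.strip() for t in tokens if t.strip()]
-- ===== SOURCE B (Python) =====
-- from typing import List
--
-- def split_tokens_angle_aware(s: str) -> List[str]:
--     """Tokenize by whitespace while keeping `<...>` blocks intact.
--
--     Index-based scanner: skips whitespace between tokens, then consumes
--     either a whole angle-bracketed block (tracking nesting and `\\` escapes)
--     or a plain run up to the next unescaped whitespace or `<`.
--     """
--     n = len(s)
--     tokens: List[str] = []
--     i = 0
--     while i < n: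
--         ch = s[i]
--         if ch.isspace():
--             i += 1
--             continue
--         if ch == '<':
--             # consume a whole angle block
--             j = i + 1
--             depth = 1
--             while j < n:
--                 c = s[j]
--                 if c == '\\':
--                     j += 2
--                     continue
--                 if c == '<':
--                     depth += 1
--                 elif c == '>':
--                     depth -= 1
--                     if depth == 0:
--                         j += 1
--                         break
--                 j += 1
--             tokens.append(s[i:min(j, n)])
--             i = j
--         else:
--             # consume a plain run; '\' escapes the next char, bare '>' is ordinary
--             j = i
--             while j < n:
--                 c = s[j]
--                 if c == '\\':
--                     j += 2
--                     continue
--                 if c == '<' or c.isspace():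
--                     break
--                 j += 1
--             tokens.append(s[i:min(j, n)])
--             i = j
--     return [t.strip() for t in tokens if t.strip()]
-- ===== Notes on version B (the rewrite author's own statement) =====
-- stated objective: alternative
-- what changed: Replaced the single per-character state machine (persistent buf/depth/escape flags threaded through one loop) by an index-based scanner: an outer loop that skips whitespace and dispatches to two dedicated inner consumers, one eating a whole angle block and one eating a plain run, each handling escapes locally by consuming two characters at once.
import Mathlib
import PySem

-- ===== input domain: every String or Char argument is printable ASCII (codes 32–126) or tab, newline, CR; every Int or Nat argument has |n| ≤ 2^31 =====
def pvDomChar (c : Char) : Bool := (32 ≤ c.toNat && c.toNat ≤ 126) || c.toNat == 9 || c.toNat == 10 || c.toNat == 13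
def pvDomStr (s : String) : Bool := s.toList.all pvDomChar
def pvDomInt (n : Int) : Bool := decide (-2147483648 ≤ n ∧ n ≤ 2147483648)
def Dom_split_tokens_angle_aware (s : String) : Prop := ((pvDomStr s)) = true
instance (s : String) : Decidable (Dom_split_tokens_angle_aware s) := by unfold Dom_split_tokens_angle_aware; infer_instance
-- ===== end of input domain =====

-- B is an index-based scanner with dedicated inner consumers instead of A's single
-- per-character state machine; same cost, different decomposition (objective: alternative).

-- ===== PORT A =====
-- A's for-loop over the characters with state (tokens, buf, angle_depth, escape),
-- plus the final flush of buf; step for step.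
def pvRunA : List Char → List String → List Char → Int → Bool → List String
  | [], tokens, buf, _, _ =>
      if buf = [] then tokens else tokens ++ [String.mk buf]
  | ch :: rest, tokens, buf, depth, escape =>
      if escape then pvRunA rest tokens (buf ++ [ch]) depth false
      else if ch = '\\' then pvRunA rest tokens (buf ++ [ch]) depth true
      else if ch = '<' then
        if buf ≠ [] ∧ depth = 0 then
          pvRunA rest (tokens ++ [String.mk buf]) ([] ++ [ch]) (depth + 1) false
        else pvRunA rest tokens (buf ++ [ch]) (depth + 1) false
      else if ch = '>' then
        if 0 < depth then
          if depth - 1 = 0 then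
            pvRunA rest (tokens ++ [String.mk (buf ++ [ch])]) [] (depth - 1) false
          else pvRunA rest tokens (buf ++ [ch]) (depth - 1) false
        else pvRunA rest tokens (buf ++ [ch]) depth false
      else if PySem.Chars.isspace ch ∧ depth = 0 then
        if buf ≠ [] then pvRunA rest (tokens ++ [String.mk buf]) [] depth false
        else pvRunA rest tokens buf depth false
      else pvRunA rest tokens (buf ++ [ch]) depth false

def split_tokens_angle_aware (s : String) : List String :=
  ((pvRunA s.toList [] [] 0 false).filter
      (fun t => PySem.Str.strip t != "")).map PySem.Str.strip

-- ===== PORT B =====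
-- Inner consumer for an angle block: returns (consumed chars, rest); '\' escapes
-- consume two chars at once and never change the depth (Source B's inner `while` with j).
def pvAngle : List Char → Int → List Char × List Char
  | [], _ => ([], [])
  | c :: rest, d =>
      if c = '\\' then
        match rest with
        | [] => ([c], [])
        | e :: rest' => (c :: e :: (pvAngle rest' d).1, (pvAngle rest' d).2)
      else if c = '<' then (c :: (pvAngle rest (d + 1)).1, (pvAngle rest (d + 1)).2)
      else if c = '>' then
        if d - 1 = 0 then ([c], rest)
        else (c :: (pvAngle rest (d - 1)).1, (pvAngle rest (d - 1)).2)
      else (c :: (pvAngle rest d).1, (pvAngle rest d).2)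

-- Inner consumer for a plain run: stops before an unescaped '<' or whitespace.
def pvPlain : List Char → List Char × List Char
  | [] => ([], [])
  | c :: rest =>
      if c = '\\' then
        match rest with
        | [] => ([c], [])
        | e :: rest' => (c :: e :: (pvPlain rest').1, (pvPlain rest').2)
      else if c = '<' ∨ PySem.Chars.isspace c then ([], c :: rest)
      else (c :: (pvPlain rest).1, (pvPlain rest).2)

-- length bounds used only for pvScan's termination
theorem pvAngle_rest_le (l : List Char) (d : Int) : (pvAngle l d).2.length ≤ l.length := by
  fun_induction pvAngle l d <;> simp_all <;> omega

theorem pvPlain_rest_le (l : List Char) : (pvPlain l).2.length ≤ l.length := by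
  fun_induction pvPlain l <;> simp_all <;> omega

theorem pvPlain_rest_lt (c : Char) (rest : List Char) (h1 : ¬ PySem.Chars.isspace c = true)
    (h2 : ¬ c = '<') : (pvPlain (c :: rest)).2.length < rest.length + 1 := by
  have h3 : ¬ (c = '<' ∨ PySem.Chars.isspace c = true) := by simp_all
  by_cases hc : c = '\\'
  · subst hc
    cases rest with
    | nil => rw [pvPlain.eq_def]; simp
    | cons e r =>
        have := pvPlain_rest_le r
        rw [pvPlain.eq_def]; simp; omega
  · have := pvPlain_rest_le rest
    rw [pvPlain.eq_def]; simp [hc, h3]; omega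

-- Outer scanner (Source B's `while i < n` loop): skip whitespace, else consume one token.
def pvScan : List Char → List String
  | [] => []
  | c :: rest =>
      if PySem.Chars.isspace c then pvScan rest
      else if c = '<' then
        String.mk ('<' :: (pvAngle rest 1).1) :: pvScan (pvAngle rest 1).2
      else
        String.mk (pvPlain (c :: rest)).1 :: pvScan (pvPlain (c :: rest)).2
  termination_by l => l.length
  decreasing_by
    all_goals simp only [List.length_cons]
    · omega
    · have := pvAngle_rest_le rest 1; omega
    · exact pvPlain_rest_lt c rest ‹_› ‹_›

def split_tokens_angle_aware_alt (s : String) : List String :=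
  ((pvScan s.toList).filter (fun t => PySem.Str.strip t != "")).map PySem.Str.strip

-- ===== PRECONDITION & SPEC =====
def Spec_split_tokens_angle_aware (s : String) (out : List String) : Prop := out = split_tokens_angle_aware_alt s
instance (s : String) (out : List String) : Decidable (Spec_split_tokens_angle_aware s out) := by unfold Spec_split_tokens_angle_aware; infer_instance

-- ===== CLAIM (what is proved, stated in full; the proofs are below) =====
def Claim_equal_split_tokens_angle_aware : Prop := ∀ (s : String), Dom_split_tokens_angle_aware s → Spec_split_tokens_angle_aware s (split_tokens_angle_aware s)

-- ===== LEMMAS AND PROOFS =====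

-- one-step unfolding lemmas
theorem pvRunA_nil (tokens : List String) (buf : List Char) (d : Int) (e : Bool) :
    pvRunA [] tokens buf d e = if buf = [] then tokens else tokens ++ [String.mk buf] := rfl

theorem pvRunA_cons (ch : Char) (rest : List Char) (tokens : List String) (buf : List Char)
    (depth : Int) (escape : Bool) :
    pvRunA (ch :: rest) tokens buf depth escape =
      (if escape then pvRunA rest tokens (buf ++ [ch]) depth false
      else if ch = '\\' then pvRunA rest tokens (buf ++ [ch]) depth true
      else if ch = '<' then
        if buf ≠ [] ∧ depth = 0 then
          pvRunA rest (tokens ++ [String.mk buf]) ([] ++ [ch]) (depth + 1) false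
        else pvRunA rest tokens (buf ++ [ch]) (depth + 1) false
      else if ch = '>' then
        if 0 < depth then
          if depth - 1 = 0 then
            pvRunA rest (tokens ++ [String.mk (buf ++ [ch])]) [] (depth - 1) false
          else pvRunA rest tokens (buf ++ [ch]) (depth - 1) false
        else pvRunA rest tokens (buf ++ [ch]) depth false
      else if PySem.Chars.isspace ch ∧ depth = 0 then
        if buf ≠ [] then pvRunA rest (tokens ++ [String.mk buf]) [] depth false
        else pvRunA rest tokens buf depth false
      else pvRunA rest tokens (buf ++ [ch]) depth false) := rfl

theorem pvRunA_esc (ch : Char) (rest : List Char) (tokens : List String) (buf : List Char)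
    (depth : Int) :
    pvRunA (ch :: rest) tokens buf depth true = pvRunA rest tokens (buf ++ [ch]) depth false := rfl

theorem pvScan_nil : pvScan [] = [] := by rw [pvScan]

theorem pvScan_cons (c : Char) (rest : List Char) :
    pvScan (c :: rest) =
      (if PySem.Chars.isspace c then pvScan rest
      else if c = '<' then
        String.mk ('<' :: (pvAngle rest 1).1) :: pvScan (pvAngle rest 1).2
      else
        String.mk (pvPlain (c :: rest)).1 :: pvScan (pvPlain (c :: rest)).2) := by
  rw [pvScan]

theorem pvPlain_esc_nil : pvPlain ['\\'] = (['\\'], []) := rfl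

theorem pvPlain_esc_cons (e : Char) (r : List Char) :
    pvPlain ('\\' :: e :: r) = ('\\' :: e :: (pvPlain r).1, (pvPlain r).2) := rfl

theorem pvPlain_cons' (c : Char) (rest : List Char) (h : ¬ c = '\\') :
    pvPlain (c :: rest) =
      (if c = '<' ∨ PySem.Chars.isspace c then ([], c :: rest)
      else (c :: (pvPlain rest).1, (pvPlain rest).2)) := by
  rw [pvPlain.eq_def]; simp [h]

theorem pvAngle_esc_nil (d : Int) : pvAngle ['\\'] d = (['\\'], []) := rfl

theorem pvAngle_esc_cons (e : Char) (r : List Char) (d : Int) :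
    pvAngle ('\\' :: e :: r) d = ('\\' :: e :: (pvAngle r d).1, (pvAngle r d).2) := rfl

theorem pvAngle_cons' (c : Char) (rest : List Char) (d : Int) (h : ¬ c = '\\') :
    pvAngle (c :: rest) d =
      (if c = '<' then (c :: (pvAngle rest (d + 1)).1, (pvAngle rest (d + 1)).2)
      else if c = '>' then
        if d - 1 = 0 then ([c], rest)
        else (c :: (pvAngle rest (d - 1)).1, (pvAngle rest (d - 1)).2)
      else (c :: (pvAngle rest d).1, (pvAngle rest d).2)) := by
  rw [pvAngle.eq_def]; simp [h]

-- The combined invariant: A's machine, started in scan / plain / angle mode,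
-- produces exactly what B's corresponding consumer produces.
theorem pvMachine (n : Nat) :
    ∀ l : List Char, l.length ≤ n →
      (∀ tokens, pvRunA l tokens [] 0 false = tokens ++ pvScan l) ∧
      (∀ tokens buf, buf ≠ [] →
        pvRunA l tokens buf 0 false
          = tokens ++ [String.mk (buf ++ (pvPlain l).1)] ++ pvScan (pvPlain l).2) ∧
      (∀ tokens buf (d : Int), buf ≠ [] → 1 ≤ d →
        pvRunA l tokens buf d false
          = tokens ++ [String.mk (buf ++ (pvAngle l d).1)] ++ pvScan (pvAngle l d).2) := by
  induction n with
  | zero =>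
      intro l hl
      have : l = [] := List.eq_nil_of_length_eq_zero (Nat.le_zero.mp hl)
      subst this
      refine ⟨fun tokens => by simp [pvRunA_nil, pvScan_nil],
              fun tokens buf hbuf => by simp [pvRunA_nil, pvScan_nil, pvPlain, hbuf],
              fun tokens buf d hbuf hd => by simp [pvRunA_nil, pvScan_nil, pvAngle, hbuf]⟩
  | succ n ih =>
      intro l hl
      match l with
      | [] => exact ih [] (by simp)
      | c :: rest =>
          have hrn : rest.length ≤ n := by simpa using Nat.succ_le_succ_iff.mp (by simpa using hl)
          refine ⟨?_, ?_, ?_⟩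
          · -- scan mode
            intro tokens
            by_cases hb : c = '\\'
            · subst hb
              match rest with
              | [] =>
                  simp [pvRunA_cons, pvRunA_nil, pvScan_cons, pvScan_nil,
                        pvPlain_esc_nil, PySem.Chars.isspace]
              | e :: r =>
                  have hr2 : r.length ≤ n := by simp at hrn; omega
                  rw [pvRunA_cons, if_neg (by simp), if_pos rfl, pvRunA_esc,
                      show ((([] : List Char) ++ ['\\']) ++ [e]) = ['\\', e] from rfl,
                      (ih r hr2).2.1 tokens ['\\', e] (by simp),
                      pvScan_cons, if_neg (by decide), if_neg (by decide), pvPlain_esc_cons]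
                  simp
            · by_cases hlt : c = '<'
              · subst hlt
                rw [pvRunA_cons, if_neg (by simp), if_neg (by decide), if_pos rfl,
                    if_neg (by simp)]
                simp only [List.nil_append, zero_add]
                rw [(ih rest hrn).2.2 tokens ['<'] 1 (by simp) le_rfl,
                    pvScan_cons, if_neg (by decide), if_pos rfl]
                simp
              · by_cases hgt : c = '>'
                · subst hgt
                  rw [pvRunA_cons, if_neg (by simp), if_neg (by decide), if_neg (by decide),
                      if_pos rfl, if_neg (by decide)]
                  simp only [List.nil_append]
                  rw [(ih rest hrn).2.1 tokens ['>'] (by simp),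
                      pvScan_cons, if_neg (by decide), if_neg (by decide),
                      pvPlain_cons' _ _ (by decide), if_neg (by decide)]
                  simp
                · by_cases hsp : PySem.Chars.isspace c = true
                  · rw [pvRunA_cons, if_neg (by simp), if_neg hb, if_neg hlt, if_neg hgt,
                        if_pos (show PySem.Chars.isspace c = true ∧ (0 : Int) = 0 from ⟨hsp, rfl⟩),
                        if_neg (by simp), (ih rest hrn).1 tokens, pvScan_cons, if_pos hsp]
                  · rw [pvRunA_cons, if_neg (by simp), if_neg hb, if_neg hlt, if_neg hgt,
                        if_neg (fun h => hsp h.1)]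
                    simp only [List.nil_append]
                    rw [(ih rest hrn).2.1 tokens [c] (by simp),
                        pvScan_cons, if_neg hsp, if_neg hlt, pvPlain_cons' _ _ hb,
                        if_neg (by simp [hlt, hsp])]
                    simp
          · -- plain mode
            intro tokens buf hbuf
            by_cases hb : c = '\\'
            · subst hb
              match rest with
              | [] =>
                  rw [pvRunA_cons, if_neg (by simp), if_pos rfl, pvRunA_nil,
                      if_neg (by simp), pvPlain_esc_nil, pvScan_nil]
                  simp
              | e :: r =>
                  have hr2 : r.length ≤ n := by simp at hrn; omega
                  rw [pvRunA_cons, if_neg (by simp), if_pos rfl, pvRunA_esc]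
                  simp only [List.append_assoc, List.singleton_append]
                  rw [(ih r hr2).2.1 tokens (buf ++ ['\\', e]) (by simp), pvPlain_esc_cons]
                  simp
            · by_cases hlt : c = '<'
              · subst hlt
                rw [pvRunA_cons, if_neg (by simp), if_neg (by decide), if_pos rfl,
                    if_pos (show buf ≠ [] ∧ (0 : Int) = 0 from ⟨hbuf, rfl⟩)]
                simp only [List.nil_append, zero_add]
                rw [(ih rest hrn).2.2 (tokens ++ [String.mk buf]) ['<'] 1 (by simp) le_rfl,
                    pvPlain_cons' _ _ (by decide), if_pos (Or.inl rfl),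
                    pvScan_cons, if_neg (by decide), if_pos rfl]
                simp
              · by_cases hgt : c = '>'
                · subst hgt
                  rw [pvRunA_cons, if_neg (by simp), if_neg (by decide), if_neg (by decide),
                      if_pos rfl, if_neg (by decide),
                      (ih rest hrn).2.1 tokens (buf ++ ['>']) (by simp),
                      pvPlain_cons' _ _ (by decide), if_neg (by decide)]
                  simp
                · by_cases hsp : PySem.Chars.isspace c = true
                  · rw [pvRunA_cons, if_neg (by simp), if_neg hb, if_neg hlt, if_neg hgt,
                        if_pos (show PySem.Chars.isspace c = true ∧ (0 : Int) = 0 from ⟨hsp, rfl⟩),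
                        if_pos hbuf, (ih rest hrn).1 (tokens ++ [String.mk buf]),
                        pvPlain_cons' _ _ hb, if_pos (Or.inr hsp),
                        pvScan_cons, if_pos hsp]
                    simp
                  · rw [pvRunA_cons, if_neg (by simp), if_neg hb, if_neg hlt, if_neg hgt,
                        if_neg (fun h => hsp h.1),
                        (ih rest hrn).2.1 tokens (buf ++ [c]) (by simp),
                        pvPlain_cons' _ _ hb, if_neg (by simp [hlt, hsp])]
                    simp
          · -- angle mode
            intro tokens buf d hbuf hd
            have hd0 : d ≠ 0 := by omega
            by_cases hb : c = '\\'
            · subst hb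
              match rest with
              | [] =>
                  rw [pvRunA_cons, if_neg (by simp), if_pos rfl, pvRunA_nil,
                      if_neg (by simp), pvAngle_esc_nil, pvScan_nil]
                  simp
              | e :: r =>
                  have hr2 : r.length ≤ n := by simp at hrn; omega
                  rw [pvRunA_cons, if_neg (by simp), if_pos rfl, pvRunA_esc]
                  simp only [List.append_assoc, List.singleton_append]
                  rw [(ih r hr2).2.2 tokens (buf ++ ['\\', e]) d (by simp) hd, pvAngle_esc_cons]
                  simp
            · by_cases hlt : c = '<'
              · subst hlt
                rw [pvRunA_cons, if_neg (by simp), if_neg (by decide), if_pos rfl,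
                    if_neg (fun h => hd0 h.2),
                    (ih rest hrn).2.2 tokens (buf ++ ['<']) (d + 1) (by simp) (by omega),
                    pvAngle_cons' _ _ _ (by decide), if_pos rfl]
                simp
              · by_cases hgt : c = '>'
                · subst hgt
                  by_cases hd1 : d - 1 = 0
                  · rw [pvRunA_cons, if_neg (by simp), if_neg (by decide), if_neg (by decide),
                        if_pos rfl, if_pos (by omega : (0 : Int) < d), if_pos hd1, hd1,
                        (ih rest hrn).1 (tokens ++ [String.mk (buf ++ ['>'])])]
                    simp [pvAngle_cons' '>' rest d (by decide), hd1]
                  · rw [pvRunA_cons, if_neg (by simp), if_neg (by decide), if_neg (by decide),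
                        if_pos rfl, if_pos (by omega : (0 : Int) < d), if_neg hd1,
                        (ih rest hrn).2.2 tokens (buf ++ ['>']) (d - 1) (by simp) (by omega),
                        pvAngle_cons' _ _ _ (by decide), if_neg (by decide), if_pos rfl,
                        if_neg hd1]
                    simp
                · rw [pvRunA_cons, if_neg (by simp), if_neg hb, if_neg hlt, if_neg hgt,
                      if_neg (fun h => hd0 h.2),
                      (ih rest hrn).2.2 tokens (buf ++ [c]) d (by simp) hd,
                      pvAngle_cons' _ _ _ hb, if_neg hlt, if_neg hgt]
                  simp

-- ===== VERDICT (by name: the statement is the Claim_ definition above) =====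
theorem split_tokens_angle_aware_spec : Claim_equal_split_tokens_angle_aware := by
  intro s _
  unfold Spec_split_tokens_angle_aware split_tokens_angle_aware split_tokens_angle_aware_alt
  rw [(pvMachine s.toList.length s.toList le_rfl).1 []]
  simp
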